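-- pv_equiv track=rewrite | github.com/jer-irl/advent-2019 | sol03b.py | steps_to_point
-- ===== SOURCE A (Python) =====
-- def steps_to_point(point, segments):
--     distance = 0
--     for start, end in segments:
--         if start[0] == end[0]:
--             if start[0] == point[0]:
--                 if start[1] < end[1] and start[1] < point[1] <= end[1]:
--                     return distance + point[1] - start[1]
--                 elif end[1] < start[1] and end[1] <= point[1] < start[1]:
--                     return distance + start[1] - point[1]
--             distance += abs(start[1] - end[1])
--         elif start[1] == end[1]:
--             if start[1] == point[1]:
--                 if start[0] < end[0] and start[0] < point[0] <= end[0]: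
--                     return distance + point[0] - start[0]
--                 elif end[0] < start[0] and end[0] <= point[0] < start[0]:
--                     return distance + start[0] - point[0]
--             distance += abs(start[0] - end[0])
--         else:
--             raise RuntimeError()
--     raise RuntimeError()
-- ===== SOURCE B (Python) =====
-- def steps_to_point(point, segments):
--     steps = 0
--     for (sx, sy), (ex, ey) in segments:
--         if sx != ex and sy != ey:
--             raise RuntimeError()
--         dx = (ex > sx) - (ex < sx)
--         dy = (ey > sy) - (ey < sy)
--         x, y = sx, sy
--         while (x, y) != (ex, ey):
--             x += dx
--             y += dy
--             steps += 1
--             if (x, y) == point: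
--                 return steps
--     raise RuntimeError()
-- ===== Notes on version B (the rewrite author's own statement) =====
-- stated objective: alternative
-- what changed: B replaces A's per-segment interval arithmetic with an explicit unit-step grid walk along each axis-aligned segment, returning the cumulative step count the first time the walker lands on the query point (the segment start is naturally never checked, since checks happen after each step).
import Mathlib
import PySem

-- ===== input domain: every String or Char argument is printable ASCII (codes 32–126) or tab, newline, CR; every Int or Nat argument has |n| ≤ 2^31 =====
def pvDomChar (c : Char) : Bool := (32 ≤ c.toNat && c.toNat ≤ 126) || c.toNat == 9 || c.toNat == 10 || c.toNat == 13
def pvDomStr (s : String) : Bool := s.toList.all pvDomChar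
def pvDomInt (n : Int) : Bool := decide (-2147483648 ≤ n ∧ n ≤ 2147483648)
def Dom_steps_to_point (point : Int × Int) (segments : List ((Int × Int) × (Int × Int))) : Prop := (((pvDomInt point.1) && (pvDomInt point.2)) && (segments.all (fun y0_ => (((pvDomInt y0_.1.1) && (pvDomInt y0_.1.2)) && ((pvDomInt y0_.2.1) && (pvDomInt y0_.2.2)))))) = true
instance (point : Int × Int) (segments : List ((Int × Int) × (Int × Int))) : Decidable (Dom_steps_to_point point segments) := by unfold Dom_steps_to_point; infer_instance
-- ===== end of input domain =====

-- B replaces A's per-segment interval arithmetic with an explicit unit-step grid walk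
-- (same return value and same raise sites; neither A nor B mutates its arguments).
-- Both ports return 0 on the raise paths of their Python; Pre_ excludes exactly those inputs.

-- ===== PORT A =====
-- literal transliteration of A's loop: accumulated `distance`, nested branch tests per segment
def stepsA (point : Int × Int) : List ((Int × Int) × (Int × Int)) → Int → Int
  | [], _ => 0  -- Python: raise RuntimeError()
  | (s, e) :: rest, dist =>
    if s.1 = e.1 then
      if s.1 = point.1 ∧ s.2 < e.2 ∧ s.2 < point.2 ∧ point.2 ≤ e.2 then
        dist + point.2 - s.2
      else if s.1 = point.1 ∧ e.2 < s.2 ∧ e.2 ≤ point.2 ∧ point.2 < s.2 then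
        dist + s.2 - point.2
      else stepsA point rest (dist + |s.2 - e.2|)
    else if s.2 = e.2 then
      if s.2 = point.2 ∧ s.1 < e.1 ∧ s.1 < point.1 ∧ point.1 ≤ e.1 then
        dist + point.1 - s.1
      else if s.2 = point.2 ∧ e.1 < s.1 ∧ e.1 ≤ point.1 ∧ point.1 < s.1 then
        dist + s.1 - point.1
      else stepsA point rest (dist + |s.1 - e.1|)
    else 0  -- Python: raise RuntimeError()

def steps_to_point (point : Int × Int) (segments : List ((Int × Int) × (Int × Int))) : Int :=
  stepsA point segments 0

-- ===== PORT B =====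
-- Python's `(b > a) - (b < a)` sign
def pvSign (a b : Int) : Int := if a < b then 1 else if b < a then -1 else 0

-- the inner `while` loop of B: step one unit at a time, check after each step;
-- the fuel n = number of unit steps of the segment only makes the loop total
def walkB (point d : Int × Int) : Nat → (Int × Int) → Int → Option Int
  | 0, _, _ => none
  | n + 1, cur, steps =>
    let nxt := (cur.1 + d.1, cur.2 + d.2)
    if nxt = point then some (steps + 1) else walkB point d n nxt (steps + 1)

def stepsB (point : Int × Int) : List ((Int × Int) × (Int × Int)) → Int → Int
  | [], _ => 0  -- Python: raise RuntimeError()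
  | (s, e) :: rest, steps =>
    if s.1 ≠ e.1 ∧ s.2 ≠ e.2 then 0  -- Python: raise RuntimeError()
    else
      let n := (e.1 - s.1).natAbs + (e.2 - s.2).natAbs
      match walkB point (pvSign s.1 e.1, pvSign s.2 e.2) n s steps with
      | some r => r
      | none => stepsB point rest (steps + (n : Int))

def steps_to_point_alt (point : Int × Int) (segments : List ((Int × Int) × (Int × Int))) : Int :=
  stepsB point segments 0

-- ===== PRECONDITION & SPEC =====
-- does A's return test fire on this segment? (pure interval conditions on the input)
def segHits (point : Int × Int) (sg : (Int × Int) × (Int × Int)) : Prop :=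
  (sg.1.1 = sg.2.1 ∧ sg.1.1 = point.1 ∧
    ((sg.1.2 < sg.2.2 ∧ sg.1.2 < point.2 ∧ point.2 ≤ sg.2.2) ∨
     (sg.2.2 < sg.1.2 ∧ sg.2.2 ≤ point.2 ∧ point.2 < sg.1.2)))
  ∨ (sg.1.1 ≠ sg.2.1 ∧ sg.1.2 = sg.2.2 ∧ sg.1.2 = point.2 ∧
    ((sg.1.1 < sg.2.1 ∧ sg.1.1 < point.1 ∧ point.1 ≤ sg.2.1) ∨
     (sg.2.1 < sg.1.1 ∧ sg.2.1 ≤ point.1 ∧ point.1 < sg.1.1)))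

def segAxis (sg : (Int × Int) × (Int × Int)) : Prop := sg.1.1 = sg.2.1 ∨ sg.1.2 = sg.2.2

-- Pre_: exactly the inputs on which Python A returns (no RuntimeError): some segment's
-- half-open interval contains the point, with every segment up to it axis-aligned
def Pre_steps_to_point (point : Int × Int) (segments : List ((Int × Int) × (Int × Int))) : Prop :=
  ∃ i < segments.length,
    segHits point (segments.getD i ((0, 0), (0, 0))) ∧
    ∀ j ≤ i, segAxis (segments.getD j ((0, 0), (0, 0)))
instance (point : Int × Int) (segments : List ((Int × Int) × (Int × Int))) : Decidable (Pre_steps_to_point point segments) := by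
  unfold Pre_steps_to_point segHits segAxis; infer_instance

def pvWitness_steps_to_point : (Int × Int) × (List ((Int × Int) × (Int × Int))) :=
  ((1, 2), [((1, 0), (1, 3))])

def Spec_steps_to_point (point : Int × Int) (segments : List ((Int × Int) × (Int × Int))) (out : Int) : Prop := out = steps_to_point_alt point segments
instance (point : Int × Int) (segments : List ((Int × Int) × (Int × Int))) (out : Int) : Decidable (Spec_steps_to_point point segments out) := by unfold Spec_steps_to_point; infer_instance

-- ===== CLAIM (what is proved, stated in full; the proofs are below) =====
def Claim_equal_steps_to_point : Prop := ∀ (point : Int × Int) (segments : List ((Int × Int) × (Int × Int))), Dom_steps_to_point point segments → Pre_steps_to_point point segments → Spec_steps_to_point point segments (steps_to_point point segments)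

-- ===== LEMMAS AND PROOFS =====

-- the walk along a vertical segment: found iff the point sits 1..n steps above/below the start
lemma walk_vert (p1 p2 c : Int) (s : Int) (hs : s = 1 ∨ s = -1) :
    ∀ (n : Nat) (a st : Int), walkB (p1, p2) (0, s) n (c, a) st =
      if p1 = c ∧ 1 ≤ s * (p2 - a) ∧ s * (p2 - a) ≤ (n : Int) then some (st + s * (p2 - a)) else none := by
  intro n
  induction n with
  | zero =>
    intro a st
    rcases hs with rfl | rfl <;> simp only [walkB] <;>
      (rw [if_neg]; rintro ⟨-, h1, h2⟩; omega)
  | succ m ih =>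
    intro a st
    simp only [walkB, add_zero]
    by_cases h : ((c : Int), a + s) = (p1, p2)
    · rw [if_pos h]
      obtain ⟨h1, h2⟩ := Prod.mk.injEq .. ▸ h
      rcases hs with rfl | rfl <;>
        (rw [if_pos (by constructor <;> omega)]; congr 1; omega)
    · rw [if_neg h, ih (a + s) (st + 1)]
      have h' : ¬(p1 = c ∧ p2 = a + s) := by
        rintro ⟨rfl, rfl⟩; exact h (by simp)
      rcases hs with rfl | rfl <;>
        (split_ifs with h1 h2 <;> push_cast at * <;> first
          | (congr 1; omega)
          | rfl)

-- the walk along a horizontal segment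
lemma walk_horiz (p1 p2 c : Int) (s : Int) (hs : s = 1 ∨ s = -1) :
    ∀ (n : Nat) (a st : Int), walkB (p1, p2) (s, 0) n (a, c) st =
      if p2 = c ∧ 1 ≤ s * (p1 - a) ∧ s * (p1 - a) ≤ (n : Int) then some (st + s * (p1 - a)) else none := by
  intro n
  induction n with
  | zero =>
    intro a st
    rcases hs with rfl | rfl <;> simp only [walkB] <;>
      (rw [if_neg]; rintro ⟨-, h1, h2⟩; omega)
  | succ m ih =>
    intro a st
    simp only [walkB, add_zero]
    by_cases h : ((a + s : Int), c) = (p1, p2)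
    · rw [if_pos h]
      obtain ⟨h1, h2⟩ := Prod.mk.injEq .. ▸ h
      rcases hs with rfl | rfl <;>
        (rw [if_pos (by constructor <;> omega)]; congr 1; omega)
    · rw [if_neg h, ih (a + s) (st + 1)]
      have h' : ¬(p1 = a + s ∧ p2 = c) := by
        rintro ⟨rfl, rfl⟩; exact h (by simp)
      rcases hs with rfl | rfl <;>
        (split_ifs with h1 h2 <;> push_cast at * <;> first
          | (congr 1; omega)
          | rfl)

-- main induction: with A's return reachable on the remaining segments, the two loops agree
lemma stepsAB (p1 p2 : Int) :
    ∀ (segs : List ((Int × Int) × (Int × Int))) (acc : Int),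
      (∃ i < segs.length,
        segHits (p1, p2) (segs.getD i ((0, 0), (0, 0))) ∧
        ∀ j ≤ i, segAxis (segs.getD j ((0, 0), (0, 0)))) →
      stepsA (p1, p2) segs acc = stepsB (p1, p2) segs acc := by
  intro segs
  induction segs with
  | nil => rintro acc ⟨i, hi, -⟩; simp at hi
  | cons sg rest ih =>
    rintro acc ⟨i, hi, hhit, haxis⟩
    obtain ⟨⟨sx, sy⟩, ⟨ex, ey⟩⟩ := sg
    have hax0 : segAxis ((sx, sy), (ex, ey)) := by
      have := haxis 0 (Nat.zero_le _); simpa using this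
    simp only [stepsA, stepsB]
    have hnd : ¬(sx ≠ ex ∧ sy ≠ ey) := by
      rcases hax0 with h | h <;> simp_all [segAxis]
    rw [if_neg hnd]
    by_cases hv : sx = ex
    · -- vertical segment
      subst hv
      have hsgn1 : pvSign sx sx = 0 := by simp [pvSign]
      by_cases hzero : sy = ey
      · -- zero-length segment: walk has no fuel, A's tests are all false
        subst hzero
        rw [if_pos rfl, if_neg (by rintro ⟨-, h, -⟩; omega),
            if_neg (by rintro ⟨-, h, -⟩; omega)]
        have hn : ((sx - sx).natAbs + (sy - sy).natAbs) = 0 := by simp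
        rw [hn]
        have : stepsA (p1, p2) rest (acc + |sy - sy|) = stepsB (p1, p2) rest (acc + ((0 : Nat) : Int)) := by
          have hrec := ih (acc + |sy - sy|) ?_
          · simpa using hrec
          · -- the hit index cannot be 0 (zero-length segment hits nothing)
            rcases i with _ | i'
            · exfalso
              rcases hhit with ⟨-, -, h⟩ | ⟨h, -⟩
              · simp at h
              · simp at h
            · exact ⟨i', by simpa using hi, by simpa using hhit,
                fun j hj => by have := haxis (j + 1) (by omega); simpa using this⟩
        exact this
      · -- genuine vertical movement
        have hs : pvSign sy ey = 1 ∨ pvSign sy ey = -1 := by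
          unfold pvSign; split_ifs <;> omega
        rw [hsgn1, walk_vert p1 p2 sx (pvSign sy ey) hs]
        have hn : (((sx - sx).natAbs + (ey - sy).natAbs : Nat) : Int) = |ey - sy| := by
          rw [Int.abs_eq_natAbs]; omega
        by_cases hup : sx = p1 ∧ sy < ey ∧ sy < p2 ∧ p2 ≤ ey
        · rw [if_pos rfl, if_pos hup]
          have hcond : p1 = sx ∧ 1 ≤ pvSign sy ey * (p2 - sy) ∧ pvSign sy ey * (p2 - sy) ≤ (((sx - sx).natAbs + (ey - sy).natAbs : Nat) : Int) := by
            have h1 : pvSign sy ey = 1 := by unfold pvSign; split_ifs <;> omega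
            rw [h1, hn]
            obtain ⟨rfl, h2, h3, h4⟩ := hup
            refine ⟨rfl, by omega, by rw [abs_of_pos (by omega)]; omega⟩
          rw [if_pos hcond]
          have h1 : pvSign sy ey = 1 := by unfold pvSign; split_ifs <;> omega
          rw [h1]; push_cast; ring
        · by_cases hdn : sx = p1 ∧ ey < sy ∧ ey ≤ p2 ∧ p2 < sy
          · rw [if_pos rfl, if_neg hup, if_pos hdn]
            have h1 : pvSign sy ey = -1 := by unfold pvSign; split_ifs <;> omega
            have hcond : p1 = sx ∧ 1 ≤ pvSign sy ey * (p2 - sy) ∧ pvSign sy ey * (p2 - sy) ≤ (((sx - sx).natAbs + (ey - sy).natAbs : Nat) : Int) := by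
              rw [h1, hn]
              obtain ⟨rfl, h2, h3, h4⟩ := hdn
              refine ⟨rfl, by omega, by rw [abs_of_neg (by omega)]; omega⟩
            rw [if_pos hcond, h1]; push_cast; ring
          · -- no hit on this segment: walk returns none, both loops recurse
            have hnohit : ¬segHits (p1, p2) ((sx, sy), (sx, ey)) := by
              intro h
              rcases h with ⟨-, h1, h2 | h2⟩ | ⟨h, -⟩
              · exact hup ⟨h1, by simpa using h2⟩
              · exact hdn ⟨h1, by simpa using h2⟩
              · simp at h
            have hwn : ¬(p1 = sx ∧ 1 ≤ pvSign sy ey * (p2 - sy) ∧ pvSign sy ey * (p2 - sy) ≤ (((sx - sx).natAbs + (ey - sy).natAbs : Nat) : Int)) := by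
              rintro ⟨h1, h2, h3⟩
              rw [hn] at h3
              rcases hs with h | h <;> rw [h] at h2 h3
              · have hse : sy < ey := by unfold pvSign at h; split_ifs at h <;> omega
                exact hup ⟨h1.symm, hse, by omega, by rw [abs_of_pos (by omega)] at h3; omega⟩
              · have hse : ey < sy := by unfold pvSign at h; split_ifs at h <;> omega
                exact hdn ⟨h1.symm, hse, by rw [abs_of_neg (by omega)] at h3; omega, by omega⟩
            rw [if_pos rfl, if_neg hup, if_neg hdn, if_neg hwn]
            have habs : |sy - ey| = (((sx - sx).natAbs + (ey - sy).natAbs : Nat) : Int) := by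
              rw [hn, abs_sub_comm]
            have hrec := ih (acc + |sy - ey|) ?_
            · rw [habs] at hrec ⊢
              exact hrec
            · rcases i with _ | i'
              · exact absurd (by simpa using hhit) hnohit
              · exact ⟨i', by simpa using hi, by simpa using hhit,
                  fun j hj => by have := haxis (j + 1) (by omega); simpa using this⟩
    · -- horizontal segment
      have hh : sy = ey := by rcases hax0 with h | h; exacts [absurd h hv, h]
      subst hh
      rw [if_neg (by simpa using hv), if_pos rfl]
      have hsgn2 : pvSign sy sy = 0 := by simp [pvSign]
      have hs : pvSign sx ex = 1 ∨ pvSign sx ex = -1 := by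
        unfold pvSign; split_ifs <;> omega
      rw [hsgn2, walk_horiz p1 p2 sy (pvSign sx ex) hs]
      have hn : (((ex - sx).natAbs + (sy - sy).natAbs : Nat) : Int) = |ex - sx| := by
        rw [Int.abs_eq_natAbs]; omega
      by_cases hup : sy = p2 ∧ sx < ex ∧ sx < p1 ∧ p1 ≤ ex
      · rw [if_pos hup]
        have h1 : pvSign sx ex = 1 := by unfold pvSign; split_ifs <;> omega
        have hcond : p2 = sy ∧ 1 ≤ pvSign sx ex * (p1 - sx) ∧ pvSign sx ex * (p1 - sx) ≤ (((ex - sx).natAbs + (sy - sy).natAbs : Nat) : Int) := by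
          rw [h1, hn]
          obtain ⟨rfl, h2, h3, h4⟩ := hup
          refine ⟨rfl, by omega, by rw [abs_of_pos (by omega)]; omega⟩
        rw [if_pos hcond, h1]; push_cast; ring
      · by_cases hdn : sy = p2 ∧ ex < sx ∧ ex ≤ p1 ∧ p1 < sx
        · rw [if_neg hup, if_pos hdn]
          have h1 : pvSign sx ex = -1 := by unfold pvSign; split_ifs <;> omega
          have hcond : p2 = sy ∧ 1 ≤ pvSign sx ex * (p1 - sx) ∧ pvSign sx ex * (p1 - sx) ≤ (((ex - sx).natAbs + (sy - sy).natAbs : Nat) : Int) := by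
            rw [h1, hn]
            obtain ⟨rfl, h2, h3, h4⟩ := hdn
            refine ⟨rfl, by omega, by rw [abs_of_neg (by omega)]; omega⟩
          rw [if_pos hcond, h1]; push_cast; ring
        · have hnohit : ¬segHits (p1, p2) ((sx, sy), (ex, sy)) := by
            intro h
            rcases h with ⟨h, -⟩ | ⟨-, -, h1, h2 | h2⟩
            · exact hv h
            · exact hup ⟨h1, by simpa using h2⟩
            · exact hdn ⟨h1, by simpa using h2⟩
          have hwn : ¬(p2 = sy ∧ 1 ≤ pvSign sx ex * (p1 - sx) ∧ pvSign sx ex * (p1 - sx) ≤ (((ex - sx).natAbs + (sy - sy).natAbs : Nat) : Int)) := by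
            rintro ⟨h1, h2, h3⟩
            rw [hn] at h3
            rcases hs with h | h <;> rw [h] at h2 h3
            · have hse : sx < ex := by unfold pvSign at h; split_ifs at h <;> omega
              exact hup ⟨h1.symm, hse, by omega, by rw [abs_of_pos (by omega)] at h3; omega⟩
            · have hse : ex < sx := by unfold pvSign at h; split_ifs at h <;> omega
              exact hdn ⟨h1.symm, hse, by rw [abs_of_neg (by omega)] at h3; omega, by omega⟩
          rw [if_neg hup, if_neg hdn, if_neg hwn]
          have habs : |sx - ex| = (((ex - sx).natAbs + (sy - sy).natAbs : Nat) : Int) := by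
            rw [hn, abs_sub_comm]
          have hrec := ih (acc + |sx - ex|) ?_
          · rw [habs] at hrec ⊢
            exact hrec
          · rcases i with _ | i'
            · exact absurd (by simpa using hhit) hnohit
            · exact ⟨i', by simpa using hi, by simpa using hhit,
                fun j hj => by have := haxis (j + 1) (by omega); simpa using this⟩

-- ===== VERDICT (by name: the statement is the Claim_ definition above) =====
theorem steps_to_point_spec : Claim_equal_steps_to_point := by
  intro point segments _ hpre
  obtain ⟨p1, p2⟩ := point
  exact stepsAB p1 p2 segments 0 hpre
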